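-- pv_equiv track=rewrite | github.com/virgesmith/aoc | 2023/13/solve.py | find_hpivot
-- ===== SOURCE A (Python) =====
-- def find_hpivot(map: list[str]) -> int:
--     for pivot in range(1, len(map)):
--         length = min(pivot, len(map) - pivot)
--         symmetric = True
--         for i in range(1, length + 1):
--             if map[pivot - i] != map[pivot + i - 1]:
--                 symmetric = False
--                 break
--         if symmetric:
--             return pivot
--     return 0
-- ===== SOURCE B (Python) =====
-- def find_hpivot(map: list[str]) -> int:
--     # Manacher (even centers): compute, in one left-to-right pass reusing the
--     # mirrored radius inside the rightmost known palindromic window, the maximal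
--     # mirror radius rad[p] at every pivot; a pivot is valid iff its radius
--     # reaches the nearer edge.
--     n = len(map)
--     rad = [0] * n
--     l = r = 0
--     for p in range(1, n):
--         k = min(rad[l + r - p], r - p) if p < r else 0
--         while p - k - 1 >= 0 and p + k < n and map[p - k - 1] == map[p + k]:
--             k += 1
--         rad[p] = k
--         if p + k > r:
--             l, r = p - k, p + k
--     for p in range(1, n):
--         if rad[p] == min(p, n - p):
--             return p
--     return 0
-- ===== Notes on version B (the rewrite author's own statement) =====
-- stated objective: alternative
-- what changed: Replaces the per-pivot outward comparison scan with Manacher's algorithm for even centers: one left-to-right pass computes every pivot's maximal mirror radius, seeding each pivot from the mirrored radius inside the rightmost known palindromic window, then a scan picks the first pivot whose radius reaches the nearer edge.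
import Mathlib
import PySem

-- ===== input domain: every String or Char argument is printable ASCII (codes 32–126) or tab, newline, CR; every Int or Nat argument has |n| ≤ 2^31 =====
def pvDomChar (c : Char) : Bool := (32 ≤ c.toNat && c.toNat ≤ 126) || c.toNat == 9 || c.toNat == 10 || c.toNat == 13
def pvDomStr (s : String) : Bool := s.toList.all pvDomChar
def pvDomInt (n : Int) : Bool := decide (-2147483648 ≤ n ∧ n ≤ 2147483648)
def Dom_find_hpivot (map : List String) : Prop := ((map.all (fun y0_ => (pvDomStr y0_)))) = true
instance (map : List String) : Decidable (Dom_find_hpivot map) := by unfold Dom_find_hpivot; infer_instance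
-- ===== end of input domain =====

-- B replaces A's per-pivot outward scan by Manacher's algorithm (even centers):
-- one pass computes all maximal mirror radii, then the first pivot whose radius
-- reaches the nearer edge is returned — a genuinely different algorithm (objective: alternative).


-- ===== PORT A =====
-- inner loop: for i in range(1, length+1): if map[pivot-i] != map[pivot+i-1]: symmetric = False; break
def find_hpivot_inner (map : List String) (pivot : Int) : List Int → Bool
  | [] => true
  | i :: rest =>
    if PySem.List.pyGet? map (pivot - i) ≠ PySem.List.pyGet? map (pivot + i - 1) then false
    else find_hpivot_inner map pivot rest

-- outer loop: for pivot in range(1, len(map)): …; return pivot / return 0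
def find_hpivot_outer (map : List String) : List Int → Int
  | [] => 0
  | pivot :: rest =>
    let length := min pivot ((map.length : Int) - pivot)
    if find_hpivot_inner map pivot (PySem.List.pyRange 1 (length + 1) 1) then pivot
    else find_hpivot_outer map rest

def find_hpivot (map : List String) : Int :=
  find_hpivot_outer map (PySem.List.pyRange 1 (map.length : Int) 1)

-- ===== PORT B =====
-- while p - k - 1 >= 0 and p + k < n and map[p - k - 1] == map[p + k]: k += 1
def bext (map : List String) (n p k : Nat) : Nat :=
  if k < p ∧ k < n - p ∧ map.getD (p - 1 - k) "" = map.getD (p + k) "" then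
    bext map n p (k + 1)
  else k
termination_by min p (n - p) - k
decreasing_by omega

-- body of "for p in range(1, n)": seed from mirror inside window, extend, store, update window
def bstep (map : List String) (n : Nat) (st : List Nat × Nat × Nat) (p : Nat) :
    List Nat × Nat × Nat :=
  let rad := st.1
  let l := st.2.1
  let r := st.2.2
  let k0 := if p < r then min (rad.getD (l + r - p) 0) (r - p) else 0
  let k := bext map n p k0
  let rad' := rad.set p k
  if r < p + k then (rad', p - k, p + k) else (rad', l, r)

def find_hpivot_alt (map : List String) : Int :=
  let n := map.length
  let res := (List.range' 1 (n - 1)).foldl (bstep map n) (List.replicate n 0, 0, 0)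
  match (List.range' 1 (n - 1)).find? (fun p => res.1.getD p 0 == min p (n - p)) with
  | some p => (p : Int)
  | none => 0

-- ===== PRECONDITION & SPEC =====
def Spec_find_hpivot (map : List String) (out : Int) : Prop := out = find_hpivot_alt map
instance (map : List String) (out : Int) : Decidable (Spec_find_hpivot map out) := by unfold Spec_find_hpivot; infer_instance

-- ===== CLAIM (what is proved, stated in full; the proofs are below) =====
def Claim_equal_find_hpivot : Prop := ∀ (map : List String), Dom_find_hpivot map → Spec_find_hpivot map (find_hpivot map)

-- ===== LEMMAS AND PROOFS =====

-- mirror property: k rows on each side of pivot p agree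
def MirrorP (map : List String) (p k : Nat) : Prop :=
  ∀ j, j < k → map.getD (p - 1 - j) "" = map.getD (p + j) ""

-- A's inner loop is the conjunction of the mirror equalities over its index list
theorem inner_spec (map : List String) (p : Int) (l : List Int) :
    find_hpivot_inner map p l = true ↔
      ∀ i ∈ l, PySem.List.pyGet? map (p - i) = PySem.List.pyGet? map (p + i - 1) := by
  induction l with
  | nil => simp [find_hpivot_inner]
  | cons i rest ih =>
      simp only [find_hpivot_inner, List.mem_cons]
      by_cases h : PySem.List.pyGet? map (p - i) = PySem.List.pyGet? map (p + i - 1)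
      · simp [h, ih]
      · simp [h]

-- A's inner check at pivot q is exactly MirrorP at full depth min q (n-q)
theorem innerA_iff (map : List String) (q : Nat) (h1 : 1 ≤ q) (h2 : q < map.length) :
    (find_hpivot_inner map (q : Int)
        (PySem.List.pyRange 1 (min (q : Int) ((map.length : Int) - q) + 1) 1) = true)
      ↔ MirrorP map q (min q (map.length - q)) := by
  rw [inner_spec]
  constructor
  · intro h j hj
    have := h ((j : Int) + 1) (by rw [PySem.List.mem_pyRange_one]; omega)
    rw [PySem.List.pyGet?_of_nonneg _ (by omega),
        PySem.List.pyGet?_of_nonneg _ (by omega)] at this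
    rw [show ((q : Int) - ((j : Int) + 1)).toNat = q - 1 - j by omega,
        show ((q : Int) + ((j : Int) + 1) - 1).toNat = q + j by omega] at this
    have hlt1 : q - 1 - j < map.length := by omega
    have hlt2 : q + j < map.length := by omega
    rw [List.getElem?_eq_getElem hlt1, List.getElem?_eq_getElem hlt2] at this
    simp only [Option.some.injEq] at this
    rw [List.getD_eq_getElem _ _ hlt1, List.getD_eq_getElem _ _ hlt2]
    exact this
  · intro h i hi
    rw [PySem.List.mem_pyRange_one] at hi
    obtain ⟨j, rfl⟩ : ∃ j : Nat, i = (j : Int) + 1 := ⟨(i - 1).toNat, by omega⟩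
    have hj : j < min q (map.length - q) := by omega
    have := h j hj
    have hlt1 : q - 1 - j < map.length := by omega
    have hlt2 : q + j < map.length := by omega
    rw [List.getD_eq_getElem _ _ hlt1, List.getD_eq_getElem _ _ hlt2] at this
    rw [PySem.List.pyGet?_of_nonneg _ (by omega),
        PySem.List.pyGet?_of_nonneg _ (by omega),
        show ((q : Int) - ((j : Int) + 1)).toNat = q - 1 - j by omega,
        show ((q : Int) + ((j : Int) + 1) - 1).toNat = q + j by omega,
        List.getElem?_eq_getElem hlt1, List.getElem?_eq_getElem hlt2, this]

-- the window [c-k0, c+k0) is palindromic: x pairs with 2c-1-x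
theorem mirror_pair (map : List String) (c k0 x : Nat) (hM : MirrorP map c k0)
    (hk : k0 ≤ c) (h1 : c - k0 ≤ x) (h2 : x < c + k0) :
    map.getD x "" = map.getD (2 * c - 1 - x) "" := by
  rcases Nat.lt_or_ge x c with h | h
  · have := hM (c - 1 - x) (by omega)
    rw [show c - 1 - (c - 1 - x) = x by omega, show c + (c - 1 - x) = 2 * c - 1 - x by omega] at this
    exact this
  · have := hM (x - c) (by omega)
    rw [show c + (x - c) = x by omega] at this
    rw [show 2 * c - 1 - x = c - 1 - (x - c) by omega]
    exact this.symm

-- Manacher's mirror argument: the radius at the mirrored center transfers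
theorem mirror_transfer (map : List String) (c k0 p m : Nat) (hM : MirrorP map c k0)
    (hk : k0 ≤ c) (hpl : c < p) (hpr : p < c + k0)
    (hm : MirrorP map (2 * c - p) m) (hmq : m ≤ 2 * c - p) :
    MirrorP map p (min m (c + k0 - p)) := by
  intro j hj
  have hjm : j < m := by omega
  have hjr : j < c + k0 - p := by omega
  have h1 : map.getD (p + j) "" = map.getD (2 * c - p - 1 - j) "" := by
    have := mirror_pair map c k0 (p + j) hM hk (by omega) (by omega)
    rwa [show 2 * c - 1 - (p + j) = 2 * c - p - 1 - j by omega] at this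
  have h2 : map.getD (2 * c - p - 1 - j) "" = map.getD (2 * c - p + j) "" := hm j hjm
  have h3 : map.getD (2 * c - p + j) "" = map.getD (p - 1 - j) "" := by
    have := mirror_pair map c k0 (2 * c - p + j) hM hk (by omega) (by omega)
    rwa [show 2 * c - 1 - (2 * c - p + j) = p - 1 - j by omega] at this
  exact (h1.trans (h2.trans h3)).symm

-- the extension loop: from a valid lower bound it reaches the maximal radius
theorem bext_spec (map : List String) (n p : Nat) :
    ∀ d k, min p (n - p) - k = d → MirrorP map p k → k ≤ min p (n - p) →
      MirrorP map p (bext map n p k) ∧ bext map n p k ≤ min p (n - p) ∧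
      (bext map n p k < min p (n - p) →
        map.getD (p - 1 - bext map n p k) "" ≠ map.getD (p + bext map n p k) "") := by
  intro d
  induction d with
  | zero =>
      intro k hd hm hk
      rw [bext]
      have hne : ¬ (k < p ∧ k < n - p ∧ map.getD (p - 1 - k) "" = map.getD (p + k) "") := by
        rintro ⟨a, b, _⟩; omega
      rw [if_neg hne]
      exact ⟨hm, hk, by omega⟩
  | succ d ih =>
      intro k hd hm hk
      rw [bext]
      by_cases hc : k < p ∧ k < n - p ∧ map.getD (p - 1 - k) "" = map.getD (p + k) ""
      · rw [if_pos hc]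
        refine ih (k + 1) (by omega) ?_ (by omega)
        intro j hj
        rcases Nat.lt_or_ge j k with hjk | hjk
        · exact hm j hjk
        · have : j = k := by omega
          subst this; exact hc.2.2
      · rw [if_neg hc]
        refine ⟨hm, hk, fun hlt => ?_⟩
        intro heq
        exact hc ⟨by omega, by omega, heq⟩

-- loop invariant for the Manacher pass
def MInv (map : List String) (p : Nat) (st : List Nat × Nat × Nat) : Prop :=
  st.1.length = map.length ∧
  (∀ q, q < p → MirrorP map q (st.1.getD q 0) ∧ st.1.getD q 0 ≤ min q (map.length - q) ∧
      (st.1.getD q 0 = min q (map.length - q) ↔ MirrorP map q (min q (map.length - q)))) ∧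
  ∃ c k0, k0 ≤ c ∧ c < p ∧ MirrorP map c k0 ∧
    st.2.1 = c - k0 ∧ st.2.2 = c + k0 ∧ c + k0 ≤ map.length

theorem inv_step (map : List String) (p : Nat) (st : List Nat × Nat × Nat)
    (h1 : 1 ≤ p) (h2 : p < map.length) (hI : MInv map p st) :
    MInv map (p + 1) (bstep map map.length st p) := by
  obtain ⟨rad, l, r⟩ := st
  obtain ⟨hlen, hq, c, k0, hk0c, hcp, hMc, hl, hr, hkn⟩ := hI
  simp only at hlen hq hl hr
  subst hl hr
  set n := map.length with hn
  have hstart : MirrorP map p (if p < c + k0 then min (rad.getD ((c - k0) + (c + k0) - p) 0) ((c + k0) - p) else 0) ∧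
      (if p < c + k0 then min (rad.getD ((c - k0) + (c + k0) - p) 0) ((c + k0) - p) else 0) ≤ min p (n - p) := by
    by_cases hpr : p < c + k0
    · rw [if_pos hpr]
      have hqidx : (c - k0) + (c + k0) - p = 2 * c - p := by omega
      rw [hqidx]
      obtain ⟨hmq, hleq, _⟩ := hq (2 * c - p) (by omega)
      have htr := mirror_transfer map c k0 p (rad.getD (2 * c - p) 0) hMc hk0c hcp hpr hmq (by omega)
      have : min (rad.getD (2 * c - p) 0) (c + k0 - p) ≤ min p (n - p) := by omega
      exact ⟨htr, this⟩
    · rw [if_neg hpr]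
      exact ⟨fun j hj => by omega, by omega⟩
  obtain ⟨hsm, hsle⟩ := hstart
  obtain ⟨he1, he2, he3⟩ := bext_spec map n p _ _ rfl hsm hsle
  set e := bext map n p (if p < c + k0 then min (rad.getD ((c - k0) + (c + k0) - p) 0) ((c + k0) - p) else 0) with hedef
  have hmax : e = min p (n - p) ↔ MirrorP map p (min p (n - p)) := by
    constructor
    · intro h; exact h ▸ he1
    · intro hM
      by_contra hne
      exact he3 (by omega) (hM e (by omega))
  have hradlen : (rad.set p e).length = n := by rw [List.length_set]; exact hlen
  have hgetp : (rad.set p e).getD p 0 = e := by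
    unfold List.getD
    rw [List.getElem?_set_self (by omega)]
    rfl
  have hgetq : ∀ q, q ≠ p → (rad.set p e).getD q 0 = rad.getD q 0 := by
    intro q hqp
    unfold List.getD
    rw [List.getElem?_set_ne (by omega)]
  have hall : ∀ q, q < p + 1 → MirrorP map q ((rad.set p e).getD q 0) ∧
      (rad.set p e).getD q 0 ≤ min q (n - q) ∧
      ((rad.set p e).getD q 0 = min q (n - q) ↔ MirrorP map q (min q (n - q))) := by
    intro q hqlt
    rcases Nat.lt_or_ge q p with hlt | hge
    · rw [hgetq q (by omega)]; exact hq q hlt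
    · have : q = p := by omega
      subst this
      rw [hgetp]
      exact ⟨he1, he2, hmax⟩
  simp only [bstep]
  by_cases hw : c + k0 < p + e
  · rw [if_pos hw]
    exact ⟨hradlen, hall, p, e, by omega, by omega, he1, rfl, rfl, by omega⟩
  · rw [if_neg hw]
    exact ⟨hradlen, hall, c, k0, hk0c, by omega, hMc, rfl, rfl, hkn⟩

theorem fold_inv (map : List String) :
    ∀ m, m ≤ map.length - 1 →
      MInv map (m + 1)
        ((List.range' 1 m).foldl (bstep map map.length) (List.replicate map.length 0, 0, 0)) := by
  intro m
  induction m with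
  | zero =>
      intro _
      simp only [List.range'_zero, List.foldl_nil]
      refine ⟨by simp, ?_, 0, 0, le_refl 0, Nat.zero_lt_one, fun j hj => by omega, rfl, rfl, by omega⟩
      intro q hq
      have hz : (List.replicate map.length (0 : Nat)).getD q 0 = 0 := by
        unfold List.getD
        rcases Nat.lt_or_ge q map.length with h | h
        · rw [List.getElem?_replicate_of_lt h]; rfl
        · rw [List.getElem?_eq_none (by simpa using h)]; rfl
      rw [hz]
      have hq0 : q = 0 := by omega
      subst hq0
      exact ⟨fun j hj => by omega, by omega, by
        constructor
        · intro _ j hj; omega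
        · intro _; omega⟩
  | succ m ih =>
      intro hm
      rw [List.range'_concat, List.foldl_append]
      simp only [List.foldl_cons, List.foldl_nil, show 1 + 1 * m = m + 1 from by omega]
      exact inv_step map (m + 1) _ (by omega) (by omega) (ih (by omega))

-- A's outer loop is find? with default 0
theorem outerA_find? (map : List String) (l : List Int) :
    find_hpivot_outer map l
      = ((l.find? (fun p =>
          find_hpivot_inner map p
            (PySem.List.pyRange 1 (min p ((map.length : Int) - p) + 1) 1))).getD 0) := by
  induction l with
  | nil => simp [find_hpivot_outer]
  | cons p rest ih =>
      simp only [find_hpivot_outer, List.find?_cons]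
      by_cases hc : find_hpivot_inner map p
          (PySem.List.pyRange 1 (min p ((map.length : Int) - p) + 1) 1) = true
      · simp [hc]
      · simp only [Bool.not_eq_true] at hc
        simp [hc, ih]

theorem find?_congr_mem {α : Type} (l : List α) (p q : α → Bool)
    (h : ∀ a ∈ l, p a = q a) : l.find? p = l.find? q := by
  induction l with
  | nil => rfl
  | cons a rest ih =>
      simp only [List.find?_cons, h a (by simp)]
      by_cases hq : q a = true
      · simp [hq]
      · simp only [Bool.not_eq_true] at hq
        simp [hq, ih (fun b hb => h b (by simp [hb]))]

-- ===== VERDICT (by name: the statement is the Claim_ definition above) =====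
theorem find_hpivot_spec : Claim_equal_find_hpivot := by
  intro map _
  unfold Spec_find_hpivot
  obtain ⟨_, hprop, _⟩ := fold_inv map (map.length - 1) (le_refl _)
  have hlist : PySem.List.pyRange 1 (map.length : Int) 1
      = (List.range' 1 (map.length - 1)).map (fun p : Nat => (p : Int)) := by
    rw [PySem.List.pyRange_one,
      show ((map.length : Int) - 1).toNat = map.length - 1 from by omega,
      List.range'_eq_map_range, List.map_map]
    exact List.map_congr_left (fun k _ => by simp only [Function.comp]; push_cast; ring)
  have hA : find_hpivot map
      = (((List.range' 1 (map.length - 1)).find?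
            ((fun p => find_hpivot_inner map p
                (PySem.List.pyRange 1 (min p ((map.length : Int) - p) + 1) 1))
              ∘ (fun p : Nat => (p : Int)))).map (fun p : Nat => (p : Int))).getD 0 := by
    show find_hpivot_outer map (PySem.List.pyRange 1 (map.length : Int) 1) = _
    rw [outerA_find?, hlist, List.find?_map]
  rw [hA]
  have hpt : ∀ p ∈ List.range' 1 (map.length - 1),
      ((fun p => find_hpivot_inner map p
          (PySem.List.pyRange 1 (min p ((map.length : Int) - p) + 1) 1))
        ∘ (fun p : Nat => (p : Int))) p
      = (fun p => ((List.range' 1 (map.length - 1)).foldl (bstep map map.length)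
            (List.replicate map.length 0, 0, 0)).1.getD p 0 == min p (map.length - p)) p := by
    intro p hp
    rw [List.mem_range'_1] at hp
    simp only [Function.comp]
    obtain ⟨_, _, hbic⟩ := hprop p (by omega)
    rw [Bool.eq_iff_iff, innerA_iff map p (by omega) (by omega), beq_iff_eq]
    exact hbic.symm
  rw [find?_congr_mem _ _ _ hpt]
  show _ = find_hpivot_alt map
  simp only [find_hpivot_alt]
  rcases (List.range' 1 (map.length - 1)).find?
      (fun p => ((List.range' 1 (map.length - 1)).foldl (bstep map map.length)
          (List.replicate map.length 0, 0, 0)).1.getD p 0 == min p (map.length - p)) with _ | k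
  · rfl
  · rfl
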